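-- pv_equiv track=rewrite | github.com/sergeevivan/AliHelper-Research | AffiliateAndPurchase/analysis_v2.py | build_ac_72h_lookup
-- ===== SOURCE A (Python) =====
-- def build_ac_72h_lookup(aff_click_raw: list) -> dict:
--     """
--     Build lookup: guest_id_str -> sorted list of AC unix timestamps.
--     Used for 72h lookback check in Problem B CIS analysis.
--     Coverage: Mar 6 – Apr 3 (may miss lookback for PC events Feb 27 – Mar 8).
--     """
--     ac_by_user = {}
--     for ev in aff_click_raw:
--         props = ev.get("properties", ev) if "properties" in ev else ev
--         uid = str(props.get("$user_id", "") or "")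
--         ts  = props.get("time", 0)
--         if uid and ts:
--             ac_by_user.setdefault(uid, []).append(int(ts))
--     for uid in ac_by_user:
--         ac_by_user[uid].sort()
--     return ac_by_user
-- ===== SOURCE B (Python) =====
-- def build_ac_72h_lookup(aff_click_raw: list) -> dict:
--     """Group AC timestamps per user, keeping each user's list sorted as we go
--     (incremental sorted insertion), so no final per-user sort pass is needed."""
--     def extract(ev):
--         props = ev["properties"] if "properties" in ev else ev
--         uid = str(props.get("$user_id", "") or "")
--         ts = props.get("time", 0)
--         return uid, ts
--
--     def insort(lst, x):
--         i = 0
--         while i < len(lst) and lst[i] < x: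
--             i += 1
--         lst.insert(i, x)
--
--     ac_by_user = {}
--     for ev in aff_click_raw:
--         uid, ts = extract(ev)
--         if uid and ts:
--             insort(ac_by_user.setdefault(uid, []), int(ts))
--     return ac_by_user
-- ===== Notes on version B (the rewrite author's own statement) =====
-- stated objective: alternative
-- what changed: B keeps each user's timestamp list sorted at all times by inserting every new timestamp at its sorted position (with the extraction factored into a helper), so the final per-user sort pass of A disappears entirely.
import Mathlib
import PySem

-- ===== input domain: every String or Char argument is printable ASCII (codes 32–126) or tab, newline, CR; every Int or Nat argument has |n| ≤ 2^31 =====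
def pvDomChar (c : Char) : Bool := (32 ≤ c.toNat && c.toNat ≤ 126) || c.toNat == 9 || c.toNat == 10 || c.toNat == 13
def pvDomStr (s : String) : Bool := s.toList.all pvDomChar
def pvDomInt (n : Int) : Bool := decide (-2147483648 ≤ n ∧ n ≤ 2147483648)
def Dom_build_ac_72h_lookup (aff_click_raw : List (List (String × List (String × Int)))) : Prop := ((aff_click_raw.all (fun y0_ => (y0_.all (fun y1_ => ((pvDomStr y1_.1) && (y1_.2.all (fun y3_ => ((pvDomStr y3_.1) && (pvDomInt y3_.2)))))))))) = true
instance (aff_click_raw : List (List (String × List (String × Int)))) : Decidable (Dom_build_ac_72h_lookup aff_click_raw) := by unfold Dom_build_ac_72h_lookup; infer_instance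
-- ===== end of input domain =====

-- B keeps each user's timestamp list sorted at all times by inserting at the sorted
-- position (extraction factored into a helper), replacing A's append-then-sort passes;
-- alternative decomposition, same observable result.


-- ===== PORT A =====
-- step of A's first loop: extract props/uid/ts inline and setdefault(uid,[]).append(int(ts)).
-- When "properties" is absent the Python uid/ts are dicts: inside Pre_ the 'if uid and ts'
-- guard is then always false (A would raise TypeError otherwise), so the event is skipped.
def pvStepA (ac : PySem.Dict String (List Int)) (ev : List (String × List (String × Int))) :
    PySem.Dict String (List Int) :=
  match (PySem.Dict.mk ev).get? "properties" with
  | none => ac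
  | some props =>
    let uid : String :=
      match (PySem.Dict.mk props).get? "$user_id" with
      | some v => if v = 0 then "" else PySem.Int.toStr v
      | none => ""
    let ts : Int := (PySem.Dict.mk props).getD "time" 0
    if uid ≠ "" ∧ ts ≠ 0 then
      match ac.get? uid with
      | some l => ac.insert uid (l ++ [ts])
      | none => ac.insert uid [ts]
    else ac

def build_ac_72h_lookup (aff_click_raw : List (List (String × List (String × Int)))) : List (String × List Int) :=
  let ac := aff_click_raw.foldl pvStepA PySem.Dict.empty
  -- second loop: for uid in ac_by_user: ac_by_user[uid].sort()
  (ac.items.map (fun p => (p.1, PySem.List.sorted p.2 (fun x => x) false)))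

-- ===== PORT B =====
-- Source B's extract(ev) helper; 'none' = the missing-"properties" case, where inside Pre_
-- the guard below is always false (see comment on pvStepA).
def pvExtract (ev : List (String × List (String × Int))) : Option (String × Int) :=
  match (PySem.Dict.mk ev).get? "properties" with
  | none => none
  | some props =>
    let uid : String :=
      match (PySem.Dict.mk props).get? "$user_id" with
      | some v => if v = 0 then "" else PySem.Int.toStr v
      | none => ""
    some (uid, (PySem.Dict.mk props).getD "time" 0)

-- Source B's insort: walk past the strictly smaller elements, insert there
def pvInsort (x : Int) : List Int → List Int
  | [] => [x]
  | h :: t => if h < x then h :: pvInsort x t else x :: h :: t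

def pvStepB (ac : PySem.Dict String (List Int)) (ev : List (String × List (String × Int))) :
    PySem.Dict String (List Int) :=
  match pvExtract ev with
  | none => ac
  | some (uid, ts) =>
    if uid ≠ "" ∧ ts ≠ 0 then
      match ac.get? uid with
      | some l => ac.insert uid (pvInsort ts l)
      | none => ac.insert uid [ts]
    else ac

def build_ac_72h_lookup_alt (aff_click_raw : List (List (String × List (String × Int)))) : List (String × List Int) :=
  (aff_click_raw.foldl pvStepB PySem.Dict.empty).items

-- ===== PRECONDITION & SPEC =====
-- Pre_ excludes exactly the inputs on which A raises TypeError (int() of a dict): an event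
-- without a "properties" key whose "$user_id" and "time" entries are both non-empty dicts.
def Pre_build_ac_72h_lookup (aff_click_raw : List (List (String × List (String × Int)))) : Prop :=
  ∀ ev ∈ aff_click_raw, ((PySem.Dict.mk ev).get? "properties").isNone = true →
    ((PySem.Dict.mk ev).get? "$user_id").getD [] = [] ∨ ((PySem.Dict.mk ev).get? "time").getD [] = []
instance (aff_click_raw : List (List (String × List (String × Int)))) : Decidable (Pre_build_ac_72h_lookup aff_click_raw) := by unfold Pre_build_ac_72h_lookup; infer_instance

def pvWitness_build_ac_72h_lookup : (List (List (String × List (String × Int)))) :=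
  [[("properties", [("$user_id", 5), ("time", 100)])], [("properties", [("$user_id", 5), ("time", 7)])]]

def Spec_build_ac_72h_lookup (aff_click_raw : List (List (String × List (String × Int)))) (out : List (String × List Int)) : Prop := out = build_ac_72h_lookup_alt aff_click_raw
instance (aff_click_raw : List (List (String × List (String × Int)))) (out : List (String × List Int)) : Decidable (Spec_build_ac_72h_lookup aff_click_raw out) := by unfold Spec_build_ac_72h_lookup; infer_instance

-- ===== CLAIM (what is proved, stated in full; the proofs are below) =====
def Claim_equal_build_ac_72h_lookup : Prop := ∀ (aff_click_raw : List (List (String × List (String × Int)))), Dom_build_ac_72h_lookup aff_click_raw → Pre_build_ac_72h_lookup aff_click_raw → Spec_build_ac_72h_lookup aff_click_raw (build_ac_72h_lookup aff_click_raw)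

-- ===== LEMMAS AND PROOFS =====

-- map a sort over every value of a dict
def pvMapSort (d : PySem.Dict String (List Int)) : PySem.Dict String (List Int) :=
  PySem.Dict.mk (d.items.map (fun p => (p.1, PySem.List.sorted p.2 (fun x => x) false)))

theorem pvInsort_perm (x : Int) (l : List Int) : (pvInsort x l).Perm (x :: l) := by
  induction l with
  | nil => simp [pvInsort]
  | cons h t ih =>
    simp only [pvInsort]
    split
    · exact (ih.cons h).trans (List.Perm.swap x h t)
    · exact List.Perm.refl _

theorem pvInsort_pairwise (x : Int) (l : List Int) (hl : l.Pairwise (· ≤ ·)) :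
    (pvInsort x l).Pairwise (· ≤ ·) := by
  induction l with
  | nil => simp [pvInsort]
  | cons h t ih =>
    rw [List.pairwise_cons] at hl
    obtain ⟨hh, ht⟩ := hl
    simp only [pvInsort]
    split
    · rename_i hlt
      refine List.Pairwise.cons ?_ (ih ht)
      intro b hb
      rcases List.mem_cons.mp ((pvInsort_perm x t).mem_iff.mp hb) with rfl | hbt
      · exact le_of_lt hlt
      · exact hh b hbt
    · rename_i hnlt
      exact List.Pairwise.cons
        (by intro b hb; rcases List.mem_cons.mp hb with rfl | hbt
            · exact le_of_not_gt hnlt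
            · exact le_trans (le_of_not_gt hnlt) (hh b hbt))
        (List.Pairwise.cons hh ht)

theorem pvInsort_sorted (x : Int) (l : List Int) :
    pvInsort x (PySem.List.sorted l (fun y => y) false) = PySem.List.sorted (l ++ [x]) (fun y => y) false := by
  symm
  apply PySem.List.sorted_id_eq_of_perm_of_pairwise
  · exact (pvInsort_perm x _).trans
      (((PySem.List.sorted_perm l (fun y => y) false).cons x).trans
        (List.perm_append_comm (l₁ := [x]) (l₂ := l)))
  · exact pvInsort_pairwise x _ (PySem.List.sorted_pairwise l (fun y => y))

theorem pvGet_mapSort (d : PySem.Dict String (List Int)) (u : String) :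
    (pvMapSort d).get? u = (d.get? u).map (fun l => PySem.List.sorted l (fun x => x) false) := by
  obtain ⟨items⟩ := d
  induction items with
  | nil => rfl
  | cons p rest ih =>
    obtain ⟨k, v⟩ := p
    simp only [pvMapSort, List.map_cons, PySem.Dict.get?_mk_cons]
    split
    · rfl
    · exact ih

theorem pvContains_mapSort (d : PySem.Dict String (List Int)) (u : String) :
    (pvMapSort d).contains u = d.contains u := by
  obtain ⟨items⟩ := d
  show (items.map (fun p => (p.1, PySem.List.sorted p.2 (fun x => x) false))).any (fun p => p.1 == u)
      = items.any (fun p => p.1 == u)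
  rw [List.any_map]
  rfl

theorem pvInsert_mapSort (d : PySem.Dict String (List Int)) (u : String) (v : List Int) :
    pvMapSort (d.insert u v) = (pvMapSort d).insert u (PySem.List.sorted v (fun x => x) false) := by
  apply PySem.Dict.ext
  show ((d.insert u v).items.map (fun p => (p.1, PySem.List.sorted p.2 (fun x => x) false)))
      = ((pvMapSort d).insert u (PySem.List.sorted v (fun x => x) false)).items
  rw [PySem.Dict.items_insert, PySem.Dict.items_insert, pvContains_mapSort]
  by_cases hc : d.contains u = true
  · simp only [hc, if_true]
    show _ = List.map (fun p => if (p.1 == u) = true then (u, PySem.List.sorted v (fun x => x) false) else p)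
        (d.items.map (fun p => (p.1, PySem.List.sorted p.2 (fun x => x) false)))
    rw [List.map_map, List.map_map]
    apply List.map_congr_left
    intro p _
    by_cases hp : (p.1 == u) = true <;> simp [Function.comp, hp]
  · simp only [hc, Bool.false_eq_true, if_false, List.map_append]
    rfl

theorem pvSD_comm (ac : PySem.Dict String (List Int)) (uid : String) (ts : Int) :
    (if uid ≠ "" ∧ ts ≠ 0 then
        match (pvMapSort ac).get? uid with
        | some l => (pvMapSort ac).insert uid (pvInsort ts l)
        | none => (pvMapSort ac).insert uid [ts]
      else pvMapSort ac)
    = pvMapSort (if uid ≠ "" ∧ ts ≠ 0 then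
        match ac.get? uid with
        | some l => ac.insert uid (l ++ [ts])
        | none => ac.insert uid [ts]
      else ac) := by
  by_cases hguard : uid ≠ "" ∧ ts ≠ 0
  · rw [if_pos hguard, if_pos hguard, pvGet_mapSort]
    cases hg : ac.get? uid with
    | none =>
      simp only [Option.map_none]
      rw [pvInsert_mapSort]
      rfl
    | some l =>
      simp only [Option.map_some]
      rw [pvInsert_mapSort, pvInsort_sorted]
  · rw [if_neg hguard, if_neg hguard]

theorem pvStep_comm (ac : PySem.Dict String (List Int)) (ev : List (String × List (String × Int))) :
    pvStepB (pvMapSort ac) ev = pvMapSort (pvStepA ac ev) := by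
  simp only [pvStepA, pvStepB, pvExtract]
  cases hp : (PySem.Dict.mk ev).get? "properties" with
  | none => rfl
  | some props => exact pvSD_comm ac _ _

theorem pvFold_comm (raw : List (List (String × List (String × Int))))
    (ac : PySem.Dict String (List Int)) :
    raw.foldl pvStepB (pvMapSort ac) = pvMapSort (raw.foldl pvStepA ac) := by
  induction raw generalizing ac with
  | nil => rfl
  | cons ev rest ih =>
    simp only [List.foldl_cons, pvStep_comm, ih]

-- ===== VERDICT (by name: the statement is the Claim_ definition above) =====
theorem build_ac_72h_lookup_spec : Claim_equal_build_ac_72h_lookup := by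
  intro raw _ _
  unfold Spec_build_ac_72h_lookup build_ac_72h_lookup build_ac_72h_lookup_alt
  have h := pvFold_comm raw PySem.Dict.empty
  have he : pvMapSort PySem.Dict.empty = PySem.Dict.empty := rfl
  rw [he] at h
  rw [h]
  rfl
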